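-- pv_equiv track=rewrite | github.com/pravarv/Pangenome_Barcoding | quarter_color_code.py | pairwise_hamm_dist
-- ===== SOURCE A (Python) =====
-- def pairwise_hamm_dist(kmer_list):
--     strong_kmers = []
--     weak_kmers = []
--     k = len(kmer_list[0][0])
--     for kmer in kmer_list:
--         if all(sum([int(kmer[0][p] != other[0][p]) for p in range(k)]) >= 2 for other in kmer_list if kmer != other):
--             strong_kmers.append(kmer)
--         else:
--             weak_kmers.append(kmer)
--
--     return strong_kmers, weak_kmers
-- ===== SOURCE B (Python) =====
-- def pairwise_hamm_dist(kmer_list):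
--     k = len(kmer_list[0][0])
--     prefs = []
--     pref_count = {}
--     tup_count = {}
--     mask_prefs = {}
--     for kmer in kmer_list:
--         pre = kmer[0][:k]
--         prefs.append(pre)
--         pref_count[pre] = pref_count.get(pre, 0) + 1
--         tup_count[kmer] = tup_count.get(kmer, 0) + 1
--         for p in range(k):
--             key = (p, pre[:p], pre[p + 1:])
--             mask_prefs[key] = mask_prefs.get(key, set()) | {pre}
--     strong_kmers = []
--     weak_kmers = []
--     for kmer, pre in zip(kmer_list, prefs):
--         if pref_count[pre] > tup_count[kmer] or any(
--                 len(mask_prefs[(p, pre[:p], pre[p + 1:])]) >= 2 for p in range(k)):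
--             weak_kmers.append(kmer)
--         else:
--             strong_kmers.append(kmer)
--     return strong_kmers, weak_kmers
-- ===== Notes on version B (the rewrite author's own statement) =====
-- stated objective: faster
-- what changed: A compares every kmer against every other kmer (O(n^2*k) Hamming scans); B makes one pass that buckets each kmer's k-prefix into a hash index keyed by (position, prefix-with-that-position-removed) plus prefix/tuple counters, so a kmer is weak exactly when a bucket holds a second distinct prefix or a same-prefix distinct entry exists, with no pairwise scan.
import Mathlib
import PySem

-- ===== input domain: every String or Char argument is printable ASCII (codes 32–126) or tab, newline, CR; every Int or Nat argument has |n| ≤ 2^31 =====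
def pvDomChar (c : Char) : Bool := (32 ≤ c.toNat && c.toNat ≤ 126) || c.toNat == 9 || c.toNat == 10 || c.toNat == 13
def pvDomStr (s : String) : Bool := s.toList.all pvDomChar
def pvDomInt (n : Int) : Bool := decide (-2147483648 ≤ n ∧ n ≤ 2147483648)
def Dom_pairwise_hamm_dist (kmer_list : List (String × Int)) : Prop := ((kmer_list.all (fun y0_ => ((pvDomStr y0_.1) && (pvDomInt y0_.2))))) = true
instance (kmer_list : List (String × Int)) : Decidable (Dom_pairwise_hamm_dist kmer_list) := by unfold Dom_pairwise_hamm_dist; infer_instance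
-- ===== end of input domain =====

-- B replaces A's all-pairs O(n²·k) scan by a hash index: it buckets each kmer's k-prefix under its k
-- "mask one position" keys, so a kmer is weak iff some bucket shows a second distinct prefix (alternative algorithm; measured speed is reported).

-- ===== PORT A =====
def pairwise_hamm_dist (kmer_list : List (String × Int)) : (List (String × Int)) × (List (String × Int)) :=
  let k : Int := PySem.Str.len (PySem.List.pyGetD kmer_list 0 ("", 0)).1
  kmer_list.foldl (fun acc kmer =>
    if (kmer_list.filter (fun other => kmer != other)).all (fun other =>
        decide (2 ≤ ((PySem.List.pyRange 0 k 1).map (fun p =>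
          if PySem.Str.pyGet? kmer.1 p ≠ PySem.Str.pyGet? other.1 p then (1 : Int) else 0)).sum))
    then (acc.1 ++ [kmer], acc.2)
    else (acc.1, acc.2 ++ [kmer]))
    ([], [])

-- ===== PORT B =====
def pairwise_hamm_dist_alt (kmer_list : List (String × Int)) : (List (String × Int)) × (List (String × Int)) :=
  let k : Int := PySem.Str.len (PySem.List.pyGetD kmer_list 0 ("", 0)).1
  let st := kmer_list.foldl
    (fun (st : List String × PySem.Dict String Int × PySem.Dict (String × Int) Int ×
               PySem.Dict (Int × String × String) (PySem.Set String)) kmer =>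
      let pre := PySem.Str.slice kmer.1 none (some k)
      (st.1 ++ [pre],
       st.2.1.insert pre (st.2.1.getD pre 0 + 1),
       st.2.2.1.insert kmer (st.2.2.1.getD kmer 0 + 1),
       (PySem.List.pyRange 0 k 1).foldl (fun d p =>
         d.insert (p, PySem.Str.slice pre none (some p), PySem.Str.slice pre (some (p + 1)) none)
           (PySem.Set.union
             (d.getD (p, PySem.Str.slice pre none (some p), PySem.Str.slice pre (some (p + 1)) none)
               PySem.Set.empty) [pre]))
         st.2.2.2))
    ([], PySem.Dict.empty, PySem.Dict.empty, PySem.Dict.empty)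
  (kmer_list.zip st.1).foldl (fun acc kp =>
    if (decide (st.2.2.1.getD kp.1 0 < st.2.1.getD kp.2 0) ||
        (PySem.List.pyRange 0 k 1).any (fun p =>
          decide (2 ≤ PySem.Set.len (st.2.2.2.getD
            (p, PySem.Str.slice kp.2 none (some p), PySem.Str.slice kp.2 (some (p + 1)) none)
            PySem.Set.empty))))
    then (acc.1, acc.2 ++ [kp.1])
    else (acc.1 ++ [kp.1], acc.2))
    ([], [])

-- ===== PRECONDITION & SPEC =====
-- Pre_ admits exactly the inputs on which the Python A returns: a nonempty list in which no string is
-- shorter than the first one (A indexes every string at positions 0..len(first)-1 and raises IndexError otherwise).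
def Pre_pairwise_hamm_dist (kmer_list : List (String × Int)) : Prop :=
  kmer_list ≠ [] ∧ ∀ x ∈ kmer_list, PySem.Str.len (kmer_list.headD ("", 0)).1 ≤ PySem.Str.len x.1
instance (kmer_list : List (String × Int)) : Decidable (Pre_pairwise_hamm_dist kmer_list) := by
  unfold Pre_pairwise_hamm_dist; infer_instance
def pvWitness_pairwise_hamm_dist : (List (String × Int)) := [("ab", 0), ("ac", 1), ("ty", 5)]
def Spec_pairwise_hamm_dist (kmer_list : List (String × Int)) (out : (List (String × Int)) × (List (String × Int))) : Prop := out = pairwise_hamm_dist_alt kmer_list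
instance (kmer_list : List (String × Int)) (out : (List (String × Int)) × (List (String × Int))) : Decidable (Spec_pairwise_hamm_dist kmer_list out) := by unfold Spec_pairwise_hamm_dist; infer_instance

-- ===== CLAIM (what is proved, stated in full; the proofs are below) =====
def Claim_equal_pairwise_hamm_dist : Prop := ∀ (kmer_list : List (String × Int)), Dom_pairwise_hamm_dist kmer_list → Pre_pairwise_hamm_dist kmer_list → Spec_pairwise_hamm_dist kmer_list (pairwise_hamm_dist kmer_list)

-- ===== LEMMAS AND PROOFS =====

-- the k-prefix of a kmer's string, and the "position p masked out" key B buckets it under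
def preS (K : Nat) (x : String × Int) : String := PySem.Str.slice x.1 none (some (K : Int))

def maskKey (p : Nat) (q : String) : Int × String × String :=
  ((p : Int), PySem.Str.slice q none (some (p : Int)), PySem.Str.slice q (some ((p : Int) + 1)) none)

-- the semantic condition both programs decide per element: some OTHER entry is at Hamming distance ≤ 1
abbrev WeakP (K : Nat) (L : List (String × Int)) (x : String × Int) : Prop :=
  ∃ y ∈ L, y ≠ x ∧ (List.range K).countP (fun p => decide (x.1.toList[p]? ≠ y.1.toList[p]?)) ≤ 1

def canonFold (K : Nat) (L : List (String × Int)) : (List (String × Int)) × (List (String × Int)) :=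
  L.foldl (fun acc x => if decide (WeakP K L x) = true then (acc.1, acc.2 ++ [x]) else (acc.1 ++ [x], acc.2)) ([], [])

lemma toList_preS (K : Nat) (x : String × Int) : (preS K x).toList = x.1.toList.take K := by
  simp [preS, PySem.Str.slice, PySem.Chars.slice_eq_listSlice, PySem.List.slice_to_natCast]


-- L1
lemma nodup_all_eq_length_le_one {α : Type} {l : List α} {a : α}
    (hnd : l.Nodup) (h : ∀ b ∈ l, b = a) : l.length ≤ 1 := by
  match l with
  | [] => simp
  | [b] => simp
  | b :: c :: t =>
    exfalso
    have hb := h b (by simp)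
    have hc := h c (by simp)
    simp [hb, hc] at hnd

-- L2
lemma countP_le_one_iff {l : List Nat} (hnd : l.Nodup) (P : Nat → Bool) :
    l.countP P ≤ 1 ↔ ∃ p0, ∀ q ∈ l, P q → q = p0 := by
  rw [List.countP_eq_length_filter]
  constructor
  · intro h
    match hf : l.filter P with
    | [] =>
      exact ⟨0, fun q hq hPq => absurd (List.mem_filter.mpr ⟨hq, hPq⟩) (by simp [hf])⟩
    | [a] =>
      refine ⟨a, fun q hq hPq => ?_⟩
      have : q ∈ l.filter P := List.mem_filter.mpr ⟨hq, hPq⟩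
      rw [hf] at this; simpa using this
    | a :: b :: t => rw [hf] at h; simp at h
  · rintro ⟨p0, h⟩
    exact nodup_all_eq_length_le_one (hnd.filter P)
      (fun b hb => h b (List.mem_filter.mp hb).1 (List.mem_filter.mp hb).2)

-- L4
lemma take_eq_take_iff {α : Type} {u v : List α} {p : Nat} :
    u.take p = v.take p ↔ ∀ q < p, u[q]? = v[q]? := by
  constructor
  · intro h q hq
    have := congrArg (fun l => l[q]?) h
    simpa [List.getElem?_take, hq] using this
  · intro h
    apply List.ext_getElem?
    intro i
    by_cases hi : i < p <;> simp [hi, h]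

-- L5
lemma drop_eq_drop_iff {α : Type} {u v : List α} {m : Nat} :
    u.drop m = v.drop m ↔ ∀ q, m ≤ q → u[q]? = v[q]? := by
  constructor
  · intro h q hq
    have := congrArg (fun l => l[q - m]?) h
    simpa [List.getElem?_drop, Nat.add_sub_cancel' hq] using this
  · intro h
    apply List.ext_getElem?
    intro i
    simpa [List.getElem?_drop] using h (m + i) (by omega)

-- L6 core
lemma dist_le_one_iff {u v : List Char} {K : Nat} (hu : u.length = K) (hv : v.length = K) :
    (List.range K).countP (fun p => decide (u[p]? ≠ v[p]?)) ≤ 1 ↔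
      u = v ∨ ∃ p < K, u ≠ v ∧ u.take p = v.take p ∧ u.drop (p + 1) = v.drop (p + 1) := by
  have hout : ∀ q, K ≤ q → u[q]? = v[q]? := by
    intro q hq
    rw [List.getElem?_eq_none (by omega), List.getElem?_eq_none (by omega)]
  rw [countP_le_one_iff List.nodup_range]
  constructor
  · rintro ⟨p0, h⟩
    by_cases huv : u = v
    · exact Or.inl huv
    · right
      have hex : ∃ q : Nat, u[q]? ≠ v[q]? := by
        by_contra hc
        push Not at hc
        exact huv (List.ext_getElem? hc)
      obtain ⟨q, hq⟩ := hex
      have hqK : q < K := by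
        by_contra hc
        exact hq (hout q (by omega))
      have hq0 : q = p0 := h q (List.mem_range.mpr hqK) (by simpa using hq)
      subst hq0
      refine ⟨q, hqK, huv, ?_, ?_⟩
      · rw [take_eq_take_iff]
        intro r hr
        by_contra hc
        have : r = q := h r (List.mem_range.mpr (by omega)) (by simpa using hc)
        omega
      · rw [drop_eq_drop_iff]
        intro r hr
        by_cases hrK : r < K
        · by_contra hc
          have : r = q := h r (List.mem_range.mpr hrK) (by simpa using hc)
          omega
        · exact hout r (by omega)
  · rintro (rfl | ⟨p, hpK, huv, ht, hd⟩)
    · exact ⟨0, fun q _ hq => by simp at hq⟩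
    · refine ⟨p, fun q hq hPq => ?_⟩
      rw [take_eq_take_iff] at ht
      rw [drop_eq_drop_iff] at hd
      by_contra hc
      rcases Nat.lt_or_ge q p with h' | h'
      · exact (by simpa using hPq : ¬ u[q]? = v[q]?) (ht q h')
      · exact (by simpa using hPq : ¬ u[q]? = v[q]?) (hd q (by omega))

-- L7
lemma count_map_lt_iff {α β : Type} [BEq α] [LawfulBEq α] [BEq β] [LawfulBEq β] (l : List α) (f : α → β)
    (x : α) :
    List.count x l < List.count (f x) (l.map f) ↔ ∃ y ∈ l, y ≠ x ∧ f y = f x := by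
  rw [List.count_eq_countP, List.count_eq_countP, List.countP_map]
  constructor
  · intro h
    by_contra hc
    push Not at hc
    have : List.countP ((fun b => b == f x) ∘ f) l ≤ List.countP (fun y => y == x) l := by
      apply List.countP_mono_left
      intro y hy hfy
      simp only [Function.comp, beq_iff_eq] at hfy ⊢
      by_contra hne
      exact (hc y hy (by simpa using hne)) hfy
    omega
  · rintro ⟨y, hy, hyx, hfy⟩
    obtain ⟨s, t, rfl⟩ := List.append_of_mem hy
    have h1 : ∀ (m : List α), List.countP (fun y => y == x) m ≤ List.countP ((fun b => b == f x) ∘ f) m := by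
      intro m
      apply List.countP_mono_left
      intro z _ hz
      simp only [beq_iff_eq] at hz
      simp [Function.comp, hz]
    have h2 := h1 s
    have h3 := h1 t
    simp only [List.countP_append, List.countP_cons, Function.comp, beq_iff_eq, hfy, hyx]
    simp
    omega

-- L9
lemma two_le_length_iff {α : Type} {S : List α} {a : α} (hnd : S.Nodup) (ha : a ∈ S) :
    2 ≤ S.length ↔ ∃ b ∈ S, b ≠ a := by
  constructor
  · intro h
    match S, hnd with
    | b :: c :: t, hnd =>
      by_cases hb : b = a
      · refine ⟨c, by simp, ?_⟩
        subst hb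
        simp at hnd
        exact fun hc => hnd.1.1 hc.symm
      · exact ⟨b, by simp, hb⟩
  · rintro ⟨b, hb, hba⟩
    obtain ⟨s, t, rfl⟩ := List.append_of_mem hb
    have : a ∈ s ∨ a ∈ t := by
      rcases List.mem_append.mp ha with h | h
      · exact Or.inl h
      · rcases List.mem_cons.mp h with h | h
        · exact absurd h.symm hba
        · exact Or.inr h
    rcases this with h | h <;> (have := List.length_pos_of_mem h; simp; omega)

lemma fold_ins_miss {κ ν : Type} [BEq κ] [LawfulBEq κ] (ps : List Nat) (kf : Nat → κ) (g : ν → ν)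
    (e : ν) (key : κ) (h : ∀ p ∈ ps, key ≠ kf p) :
    ∀ d : PySem.Dict κ ν,
      (ps.foldl (fun d p => d.insert (kf p) (g (d.getD (kf p) e))) d).getD key e = d.getD key e := by
  induction ps with
  | nil => intro d; rfl
  | cons p0 t ih =>
    intro d
    simp only [List.foldl_cons]
    rw [ih (fun p hp => h p (by simp [hp]))]
    exact PySem.Dict.getD_insert_of_ne _ _ _ (h p0 (by simp))

lemma fold_ins_hit {κ ν : Type} [BEq κ] [LawfulBEq κ] (ps : List Nat) (kf : Nat → κ) (g : ν → ν)
    (e : ν) (hinj : Function.Injective kf) (hnd : ps.Nodup) {p : Nat} (hp : p ∈ ps) :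
    ∀ d : PySem.Dict κ ν,
      (ps.foldl (fun d p => d.insert (kf p) (g (d.getD (kf p) e))) d).getD (kf p) e
        = g (d.getD (kf p) e) := by
  induction ps with
  | nil => simp at hp
  | cons p0 t ih =>
    intro d
    simp only [List.foldl_cons]
    rcases List.mem_cons.mp hp with rfl | hpt
    · rw [fold_ins_miss t kf g e (kf p)
        (fun p' hp' hne => (List.nodup_cons.mp hnd).1 (hinj hne ▸ hp'))]
      exact PySem.Dict.getD_insert_self _ _ _ _
    · rw [ih (List.nodup_cons.mp hnd).2 hpt]
      have hne : kf p ≠ kf p0 := fun hne =>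
        (List.nodup_cons.mp hnd).1 (hinj hne ▸ hpt)
      rw [PySem.Dict.getD_insert_of_ne _ _ _ hne]

abbrev MDict := PySem.Dict (Int × String × String) (PySem.Set String)

def maskStep (K : Nat) (d : MDict) (x : String × Int) : MDict :=
  (List.range K).foldl (fun d pn => d.insert (maskKey pn (preS K x))
    (PySem.Set.union (d.getD (maskKey pn (preS K x)) PySem.Set.empty) [preS K x])) d

lemma maskKey_inj (q : String) : Function.Injective (fun pn => maskKey pn q) := by
  intro a b h
  simp only [maskKey, Prod.mk.injEq] at h
  exact_mod_cast h.1

lemma maskStep_getD_hit (K : Nat) (d : MDict) (x : String × Int) {pn : Nat} (h : pn < K) :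
    (maskStep K d x).getD (maskKey pn (preS K x)) PySem.Set.empty
      = PySem.Set.union (d.getD (maskKey pn (preS K x)) PySem.Set.empty) [preS K x] := by
  unfold maskStep
  exact fold_ins_hit (List.range K) (fun pn => maskKey pn (preS K x))
    (fun s => PySem.Set.union s [preS K x]) PySem.Set.empty (maskKey_inj _) List.nodup_range
    (List.mem_range.mpr h) d

lemma maskStep_getD_miss (K : Nat) (d : MDict) (x : String × Int) {key : Int × String × String}
    (h : ∀ pn < K, key ≠ maskKey pn (preS K x)) :
    (maskStep K d x).getD key PySem.Set.empty = d.getD key PySem.Set.empty := by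
  unfold maskStep
  exact fold_ins_miss (List.range K) (fun pn => maskKey pn (preS K x))
    (fun s => PySem.Set.union s [preS K x]) PySem.Set.empty key
    (fun p hp => h p (List.mem_range.mp hp)) d

lemma maskFold_char (K : Nat) (l : List (String × Int)) :
    ∀ d : MDict, (∀ key, (d.getD key PySem.Set.empty).Nodup) →
      ∀ key, ((l.foldl (maskStep K) d).getD key PySem.Set.empty).Nodup ∧
        ∀ q, (q ∈ (l.foldl (maskStep K) d).getD key PySem.Set.empty ↔
          q ∈ d.getD key PySem.Set.empty ∨
            ∃ x ∈ l, ∃ pn, pn < K ∧ q = preS K x ∧ key = maskKey pn (preS K x)) := by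
  induction l with
  | nil => intro d hd key; simpa using hd key
  | cons x t ih =>
    intro d hd key
    simp only [List.foldl_cons]
    have hd' : ∀ key, ((maskStep K d x).getD key PySem.Set.empty).Nodup := by
      intro key
      by_cases h : ∃ pn, pn < K ∧ key = maskKey pn (preS K x)
      · obtain ⟨pn, hpn, rfl⟩ := h
        rw [maskStep_getD_hit K d x hpn]
        exact PySem.Set.nodup_union _ _ (hd _)
      · push Not at h
        rw [maskStep_getD_miss K d x (fun pn hpn => h pn hpn)]
        exact hd key
    obtain ⟨hnd, hmem⟩ := ih (maskStep K d x) hd' key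
    refine ⟨hnd, fun q => ?_⟩
    rw [hmem q]
    by_cases h : ∃ pn, pn < K ∧ key = maskKey pn (preS K x)
    · obtain ⟨pn, hpn, hkey⟩ := h
      subst hkey
      rw [maskStep_getD_hit K d x hpn, PySem.Set.mem_union]
      constructor
      · rintro ((hq | hq) | ⟨y, hy, pn', hpn', hq, hkey'⟩)
        · exact Or.inl hq
        · exact Or.inr ⟨x, by simp, pn, hpn, by simpa using hq, rfl⟩
        · exact Or.inr ⟨y, by simp [hy], pn', hpn', hq, hkey'⟩
      · rintro (hq | ⟨y, hy, pn', hpn', hq, hkey'⟩)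
        · exact Or.inl (Or.inl hq)
        · rcases List.mem_cons.mp hy with rfl | hyt
          · exact Or.inl (Or.inr (by simp [hq]))
          · exact Or.inr ⟨y, hyt, pn', hpn', hq, hkey'⟩
    · push Not at h
      rw [maskStep_getD_miss K d x (fun pn hpn => h pn hpn)]
      constructor
      · rintro (hq | ⟨y, hy, pn', h'⟩)
        · exact Or.inl hq
        · exact Or.inr ⟨y, by simp [hy], pn', h'⟩
      · rintro (hq | ⟨y, hy, pn', hpn', hq, hkey'⟩)
        · exact Or.inl hq
        · rcases List.mem_cons.mp hy with rfl | hyt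
          · exact absurd hkey' (h pn' hpn')
          · exact Or.inr ⟨y, hyt, pn', hpn', hq, hkey'⟩


lemma condA_eq (L : List (String × Int)) (K : Nat) (x : String × Int) :
  ((L.filter (fun y => x != y)).all (fun y =>
      decide (2 ≤ ((PySem.List.pyRange 0 (K:Int) 1).map (fun p =>
        if PySem.Str.pyGet? x.1 p ≠ PySem.Str.pyGet? y.1 p then (1 : Int) else 0)).sum))
   ) = !decide (WeakP K L x) := by
  have hsum : ∀ y : String × Int,
      ((PySem.List.pyRange 0 (K:Int) 1).map (fun p =>
        if PySem.Str.pyGet? x.1 p ≠ PySem.Str.pyGet? y.1 p then (1 : Int) else 0)).sum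
      = ((List.range K).countP (fun p => decide (x.1.toList[p]? ≠ y.1.toList[p]?)) : Int) := by
    intro y
    rw [PySem.List.pyRange_zero_natCast, List.map_map]
    rw [show ((fun p => if PySem.Str.pyGet? x.1 p ≠ PySem.Str.pyGet? y.1 p then (1:Int) else 0) ∘ (fun k : Nat => (k:Int)))
        = (fun p : Nat => if (fun q : Nat => decide (x.1.toList[q]? ≠ y.1.toList[q]?)) p = true then (1:Int) else 0) from funext fun p => by
          simp [PySem.Str.pyGet?_eq, PySem.Chars.pyGet?_eq_listPyGet?]]
    exact PySem.List.sum_map_ite_one_zero _ _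
  simp only [hsum]
  rw [Bool.eq_iff_iff, Bool.not_eq_true', decide_eq_false_iff_not]
  simp only [List.all_eq_true, List.mem_filter, bne_iff_ne, decide_eq_true_eq]
  constructor
  · rintro h ⟨y, hy, hyx, hcnt⟩
    have := h y ⟨hy, Ne.symm hyx⟩
    omega
  · intro h y hy
    by_contra hc
    exact h ⟨y, hy.1, Ne.symm hy.2, by omega⟩

lemma str_eq_iff (a b : String) : a = b ↔ a.toList = b.toList := ⟨congrArg _, String.ext⟩

lemma toList_slice_to (q : String) (p : Nat) :
    (PySem.Str.slice q none (some (p : Int))).toList = q.toList.take p := by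
  simp [PySem.Str.slice, PySem.Chars.slice_eq_listSlice, PySem.List.slice_to_natCast]

lemma toList_slice_from (q : String) (p : Nat) :
    (PySem.Str.slice q (some ((p : Int) + 1)) none).toList = q.toList.drop (p + 1) := by
  have h : ((p : Int) + 1) = ((p + 1 : Nat) : Int) := by push_cast; ring
  have h2 : (PySem.Str.slice q (some ((p : Int) + 1)) none).toList
      = PySem.List.slice q.toList (some ((p : Int) + 1)) none := by
    simp [PySem.Str.slice, PySem.Chars.slice_eq_listSlice]
  rw [h2, h, PySem.List.slice_from_natCast]

lemma maskKey_eq_iff (p : Nat) (q q' : String) :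
    maskKey p q = maskKey p q' ↔
      q.toList.take p = q'.toList.take p ∧ q.toList.drop (p + 1) = q'.toList.drop (p + 1) := by
  simp only [maskKey, Prod.mk.injEq, true_and, str_eq_iff, toList_slice_to, toList_slice_from]

lemma countP_take_eq (u v : List Char) (K : Nat) :
    (List.range K).countP (fun p => decide ((u.take K)[p]? ≠ (v.take K)[p]?))
      = (List.range K).countP (fun p => decide (u[p]? ≠ v[p]?)) := by
  apply List.countP_congr
  intro p hp
  simp [List.mem_range.mp hp]

lemma weak_iff (K : Nat) (L : List (String × Int)) (x : String × Int) (_hx : x ∈ L)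
    (hlen : ∀ y ∈ L, K ≤ y.1.toList.length) :
    (List.count x L < List.count (preS K x) (L.map (preS K)) ∨
      ∃ pn < K, ∃ y ∈ L, preS K y ≠ preS K x ∧ maskKey pn (preS K x) = maskKey pn (preS K y))
    ↔ WeakP K L x := by
  have hlu : (x.1.toList.take K).length = K := by
    rw [List.length_take]; exact min_eq_left (hlen x _hx)
  constructor
  · rintro (hcnt | ⟨pn, hpn, y, hy, hne, hmk⟩)
    · obtain ⟨y, hy, hyx, hfy⟩ := (count_map_lt_iff L (preS K) x).mp hcnt
      refine ⟨y, hy, hyx, ?_⟩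
      have ht : x.1.toList.take K = y.1.toList.take K := by
        rw [str_eq_iff, toList_preS, toList_preS] at hfy
        exact hfy.symm
      have h0 : (List.range K).countP (fun p => decide (x.1.toList[p]? ≠ y.1.toList[p]?)) = 0 := by
        rw [List.countP_eq_zero]
        intro p hp
        simp only [decide_eq_true_eq, Decidable.not_not]
        have := take_eq_take_iff.mp ht p (List.mem_range.mp hp)
        simpa [List.getElem?_take, List.mem_range.mp hp] using this
      omega
    · have hyx : y ≠ x := fun h => hne (h ▸ rfl)
      refine ⟨y, hy, hyx, ?_⟩
      rw [← countP_take_eq]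
      have hlv : (y.1.toList.take K).length = K := by
        rw [List.length_take]; exact min_eq_left (hlen y hy)
      rw [dist_le_one_iff hlu hlv]
      obtain ⟨hmt, hmd⟩ := (maskKey_eq_iff pn _ _).mp hmk
      rw [toList_preS, toList_preS] at hmt hmd
      refine Or.inr ⟨pn, hpn, ?_, hmt, hmd⟩
      intro h
      exact hne (String.ext (by rw [toList_preS, toList_preS, h]))
  · rintro ⟨y, hy, hyx, hcnt⟩
    rw [← countP_take_eq] at hcnt
    have hlv : (y.1.toList.take K).length = K := by
      rw [List.length_take]; exact min_eq_left (hlen y hy)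
    rcases (dist_le_one_iff hlu hlv).mp hcnt with heq | ⟨p, hpK, hne', ht, hd⟩
    · refine Or.inl ((count_map_lt_iff L (preS K) x).mpr ⟨y, hy, hyx, ?_⟩)
      exact String.ext (by rw [toList_preS, toList_preS]; exact heq.symm)
    · refine Or.inr ⟨p, hpK, y, hy, ?_, ?_⟩
      · intro h
        rw [str_eq_iff, toList_preS, toList_preS] at h
        exact hne' h.symm
      · exact (maskKey_eq_iff p _ _).mpr
          ⟨by rw [toList_preS, toList_preS]; exact ht, by rw [toList_preS, toList_preS]; exact hd⟩

lemma A_char (L : List (String × Int)) (K : Nat)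
    (hK : PySem.Str.len (PySem.List.pyGetD L 0 ("", 0)).1 = (K : Int)) :
    pairwise_hamm_dist L = canonFold K L := by
  unfold pairwise_hamm_dist canonFold
  simp only [hK]
  refine PySem.List.foldl_congr_mem _ _ _ _ ?_
  intro acc x hx
  rw [condA_eq L K x]
  cases h : decide (WeakP K L x) <;> simp

lemma foldl_quad {β σ1 σ2 σ3 σ4 : Type} (f1 : σ1 → β → σ1) (f2 : σ2 → β → σ2)
    (f3 : σ3 → β → σ3) (f4 : σ4 → β → σ4) (l : List β) (a : σ1) (b : σ2) (c : σ3) (d : σ4) :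
    l.foldl (fun s e => (f1 s.1 e, f2 s.2.1 e, f3 s.2.2.1 e, f4 s.2.2.2 e)) (a, b, c, d)
      = (l.foldl f1 a, l.foldl f2 b, l.foldl f3 c, l.foldl f4 d) := by
  induction l generalizing a b c d with
  | nil => rfl
  | cons x t ih => simp only [List.foldl_cons]; exact ih _ _ _ _

lemma zip_map_self {α β : Type} (l : List α) (g : α → β) :
    l.zip (l.map g) = l.map (fun a => (a, g a)) := by
  induction l with
  | nil => rfl
  | cons x t ih => simp [ih]

lemma len_set (S : PySem.Set String) : PySem.Set.len S = (S.length : Int) := by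
  simp [PySem.Set.len]


lemma maskStep_eq (K : Nat) (e : String × Int) (d : MDict) :
    (PySem.List.pyRange 0 (K : Int) 1).foldl (fun d p =>
      d.insert (p, PySem.Str.slice (PySem.Str.slice e.1 none (some (K : Int))) none (some p),
        PySem.Str.slice (PySem.Str.slice e.1 none (some (K : Int))) (some (p + 1)) none)
        (PySem.Set.union
          (d.getD (p, PySem.Str.slice (PySem.Str.slice e.1 none (some (K : Int))) none (some p),
            PySem.Str.slice (PySem.Str.slice e.1 none (some (K : Int))) (some (p + 1)) none)
            PySem.Set.empty) [PySem.Str.slice e.1 none (some (K : Int))])) d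
    = maskStep K d e := by
  rw [PySem.List.pyRange_zero_natCast, List.foldl_map]
  rfl

lemma bucket_eq (K : Nat) (L : List (String × Int)) (x : String × Int) (pn : Nat)
    (hx : x ∈ L) (hpn : pn < K) :
    decide (2 ≤ PySem.Set.len ((L.foldl (maskStep K) PySem.Dict.empty).getD
      (maskKey pn (preS K x)) PySem.Set.empty))
    = decide (∃ y ∈ L, preS K y ≠ preS K x ∧ maskKey pn (preS K x) = maskKey pn (preS K y)) := by
  obtain ⟨hnd, hmem⟩ := maskFold_char K L PySem.Dict.empty
    (fun key => by simp [PySem.Dict.getD_empty, PySem.Set.empty]) (maskKey pn (preS K x))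
  have hxin : preS K x ∈ (L.foldl (maskStep K) PySem.Dict.empty).getD
      (maskKey pn (preS K x)) PySem.Set.empty :=
    (hmem _).mpr (Or.inr ⟨x, hx, pn, hpn, rfl, rfl⟩)
  rw [len_set, decide_eq_decide]
  have h2 : (2 : Int) ≤ (((L.foldl (maskStep K) PySem.Dict.empty).getD
      (maskKey pn (preS K x)) PySem.Set.empty).length : Int) ↔
      2 ≤ ((L.foldl (maskStep K) PySem.Dict.empty).getD
        (maskKey pn (preS K x)) PySem.Set.empty).length := by exact_mod_cast Iff.rfl
  rw [h2, two_le_length_iff hnd hxin]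
  constructor
  · rintro ⟨b, hb, hba⟩
    obtain (h0 | ⟨y, hy, pn', hpn', rfl, hkey⟩) := (hmem b).mp hb
    · simp [PySem.Dict.getD_empty, PySem.Set.empty] at h0
    · have hpp : pn' = pn := by
        have h1 := congrArg Prod.fst hkey
        simp only [maskKey] at h1
        exact_mod_cast h1.symm
      subst hpp
      exact ⟨y, hy, hba, hkey⟩
  · rintro ⟨y, hy, hne, hkey⟩
    exact ⟨preS K y, (hmem _).mpr (Or.inr ⟨y, hy, pn, hpn, rfl, hkey⟩), hne⟩

lemma condB_eq (K : Nat) (L : List (String × Int)) (x : String × Int) (hx : x ∈ L)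
    (hlen : ∀ y ∈ L, K ≤ y.1.toList.length) :
    (decide ((L.foldl (fun d (e : String × Int) => d.insert e (d.getD e 0 + 1))
        (PySem.Dict.empty : PySem.Dict (String × Int) Int)).getD x 0 <
      (L.foldl (fun d (e : String × Int) => d.insert (preS K e) (d.getD (preS K e) 0 + 1))
        (PySem.Dict.empty : PySem.Dict String Int)).getD (preS K x) 0) ||
     (PySem.List.pyRange 0 (K : Int) 1).any (fun p =>
       decide (2 ≤ PySem.Set.len ((L.foldl (maskStep K) PySem.Dict.empty).getD
         (p, PySem.Str.slice (preS K x) none (some p),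
           PySem.Str.slice (preS K x) (some (p + 1)) none) PySem.Set.empty))))
    = decide (WeakP K L x) := by
  have htc : (L.foldl (fun d (e : String × Int) => d.insert e (d.getD e 0 + 1))
      (PySem.Dict.empty : PySem.Dict (String × Int) Int)).getD x 0 = (List.count x L : Int) := by
    rw [PySem.Dict.getD_foldl_insert_add_one, PySem.Dict.getD_empty, zero_add]
  have hpc : (L.foldl (fun d (e : String × Int) => d.insert (preS K e) (d.getD (preS K e) 0 + 1))
      (PySem.Dict.empty : PySem.Dict String Int)).getD (preS K x) 0
      = (List.count (preS K x) (L.map (preS K)) : Int) := by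
    have h := PySem.Dict.getD_foldl_insert_add_one (L.map (preS K)) PySem.Dict.empty (preS K x)
    rw [List.foldl_map] at h
    rw [h, PySem.Dict.getD_empty, zero_add]
  simp only [htc, hpc]
  rw [PySem.List.pyRange_zero_natCast, List.any_map]
  have hany : ∀ pn ∈ List.range K,
      ((fun p => decide (2 ≤ PySem.Set.len ((L.foldl (maskStep K) PySem.Dict.empty).getD
          (p, PySem.Str.slice (preS K x) none (some p),
            PySem.Str.slice (preS K x) (some (p + 1)) none) PySem.Set.empty))) ∘
        (fun k : Nat => (k : Int))) pn
      = decide (∃ y ∈ L, preS K y ≠ preS K x ∧ maskKey pn (preS K x) = maskKey pn (preS K y)) := by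
    intro pn hpn
    exact bucket_eq K L x pn hx (List.mem_range.mp hpn)
  rw [PySem.List.any_congr_mem hany]
  rw [Bool.eq_iff_iff]
  simp only [Bool.or_eq_true, decide_eq_true_eq, List.any_eq_true, List.mem_range]
  rw [← weak_iff K L x hx hlen]
  constructor
  · rintro (h | ⟨pn, hpn, h⟩)
    · exact Or.inl (by exact_mod_cast h)
    · exact Or.inr ⟨pn, hpn, h⟩
  · rintro (h | ⟨pn, hpn, h⟩)
    · exact Or.inl (by exact_mod_cast h)
    · exact Or.inr ⟨pn, hpn, h⟩

lemma B_char (L : List (String × Int)) (K : Nat)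
    (hK : PySem.Str.len (PySem.List.pyGetD L 0 ("", 0)).1 = (K : Int))
    (hlen : ∀ y ∈ L, K ≤ y.1.toList.length) :
    pairwise_hamm_dist_alt L = canonFold K L := by
  unfold pairwise_hamm_dist_alt
  simp only [hK]
  have h4 := foldl_quad (f1 := fun s (e : String × Int) => s ++ [PySem.Str.slice e.1 none (some (K : Int))])
      (f2 := fun d (e : String × Int) => d.insert (PySem.Str.slice e.1 none (some (K : Int)))
        (d.getD (PySem.Str.slice e.1 none (some (K : Int))) 0 + 1))
      (f3 := fun d (e : String × Int) => d.insert e (d.getD e 0 + 1))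
      (f4 := fun (d : MDict) (e : String × Int) =>
        (PySem.List.pyRange 0 (K : Int) 1).foldl (fun d p =>
          d.insert (p, PySem.Str.slice (PySem.Str.slice e.1 none (some (K : Int))) none (some p),
            PySem.Str.slice (PySem.Str.slice e.1 none (some (K : Int))) (some (p + 1)) none)
            (PySem.Set.union
              (d.getD (p, PySem.Str.slice (PySem.Str.slice e.1 none (some (K : Int))) none (some p),
                PySem.Str.slice (PySem.Str.slice e.1 none (some (K : Int))) (some (p + 1)) none)
                PySem.Set.empty) [PySem.Str.slice e.1 none (some (K : Int))])) d)
    L ([] : List String) (PySem.Dict.empty : PySem.Dict String Int)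
    (PySem.Dict.empty : PySem.Dict (String × Int) Int) (PySem.Dict.empty : MDict)
  rw [h4]
  have hms : (fun (d : MDict) (e : String × Int) =>
      (PySem.List.pyRange 0 (K : Int) 1).foldl (fun d p =>
        d.insert (p, PySem.Str.slice (PySem.Str.slice e.1 none (some (K : Int))) none (some p),
          PySem.Str.slice (PySem.Str.slice e.1 none (some (K : Int))) (some (p + 1)) none)
          (PySem.Set.union
            (d.getD (p, PySem.Str.slice (PySem.Str.slice e.1 none (some (K : Int))) none (some p),
              PySem.Str.slice (PySem.Str.slice e.1 none (some (K : Int))) (some (p + 1)) none)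
              PySem.Set.empty) [PySem.Str.slice e.1 none (some (K : Int))])) d)
      = maskStep K := funext fun d => funext fun e => maskStep_eq K e d
  rw [hms]
  rw [PySem.List.foldl_append_singleton_eq_map, List.nil_append, zip_map_self, List.foldl_map]
  unfold canonFold
  refine PySem.List.foldl_congr_mem _ _ _ _ ?_
  intro acc x hx
  dsimp only
  have hc := condB_eq K L x hx hlen
  refine if_congr ?_ rfl rfl
  exact iff_of_eq (congrArg (· = true) hc)

-- ===== VERDICT (by name: the statement is the Claim_ definition above) =====
theorem pairwise_hamm_dist_spec : Claim_equal_pairwise_hamm_dist := by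
  intro L _ hpre
  obtain ⟨hne, hlen⟩ := hpre
  obtain ⟨x0, rest, rfl⟩ := List.exists_cons_of_ne_nil hne
  unfold Spec_pairwise_hamm_dist
  have hK : PySem.Str.len (PySem.List.pyGetD (x0 :: rest) 0 ("", 0)).1 = ((x0.1.toList.length : Nat) : Int) := by
    rw [PySem.List.pyGetD_zero_cons, PySem.Str.len_eq]
  have hlen' : ∀ y ∈ x0 :: rest, x0.1.toList.length ≤ y.1.toList.length := by
    intro y hy
    have := hlen y hy
    simp only [List.headD_cons, PySem.Str.len_eq] at this
    exact_mod_cast this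
  rw [A_char _ _ hK, B_char _ _ hK hlen']
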